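-- pv_equiv track=rewrite | github.com/rickohnemorty/sudokuTool | python code/unused functions/bf.py | square_combine_rows
-- ===== SOURCE A (Python) =====
-- def square_combine_rows(puzzle):
--     output = []
--     for i in combine_to_squares(puzzle):
--         squareAsRow = []
--         for e in i:
--             for n in e:
--                 squareAsRow.append(n)
--         output.append(squareAsRow)
--     return output
--
-- def split_rows(puzzle):
--     splitArr = []
--     for i in puzzle:
--         splitArr.append(i[:3])
--         splitArr.append(i[3:6])
--         splitArr.append(i[6:9])
--     return splitArr
--
-- def combine_to_squares(puzzle):
--     splitArr = split_rows(puzzle)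
--     squares = [[],[],[],
--                [],[],[],
--                [],[],[]]
--     counter = 0
--     for i in splitArr:
--         if counter == 0 or counter == 3 or counter == 6:
--             squares[0].append(i)
--         elif counter == 1 or counter == 4 or counter == 7:
--             squares[1].append(i)
--         elif counter == 2 or counter == 5 or counter == 8:
--             squares[2].append(i)
--         elif counter == 9 or counter == 12 or counter == 15:
--             squares[3].append(i)
--         elif counter == 10 or counter == 13 or counter == 16:
--             squares[4].append(i)
--         elif counter == 11 or counter == 14 or counter == 17:
--             squares[5].append(i)
--         elif counter == 18 or counter == 21 or counter == 24:
--             squares[6].append(i)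
--         elif counter == 19 or counter == 22 or counter == 25:
--             squares[7].append(i)
--         elif counter == 20 or counter == 23 or counter == 26:
--             squares[8].append(i)
--         else:
--             pass
--         counter += 1
--     return squares
-- ===== SOURCE B (Python) =====
-- def square_combine_rows(puzzle):
--     output = []
--     for b in range(9):
--         br = (b // 3) * 3
--         bc = (b % 3) * 3
--         row = []
--         for r in range(br, br + 3):
--             if r < len(puzzle):
--                 row += list(puzzle[r][bc:bc + 3])
--         output.append(row)
--     return output
-- ===== Notes on version B (the rewrite author's own statement) =====
-- stated objective: simpler
-- what changed: B computes each of the nine 3x3 boxes directly from box-index arithmetic ((b//3)*3, (b%3)*3) and row slices, replacing A's three-pass split-into-thirds, 27-way counter-bucket dispatch and element-by-element flatten.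
import Mathlib
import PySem

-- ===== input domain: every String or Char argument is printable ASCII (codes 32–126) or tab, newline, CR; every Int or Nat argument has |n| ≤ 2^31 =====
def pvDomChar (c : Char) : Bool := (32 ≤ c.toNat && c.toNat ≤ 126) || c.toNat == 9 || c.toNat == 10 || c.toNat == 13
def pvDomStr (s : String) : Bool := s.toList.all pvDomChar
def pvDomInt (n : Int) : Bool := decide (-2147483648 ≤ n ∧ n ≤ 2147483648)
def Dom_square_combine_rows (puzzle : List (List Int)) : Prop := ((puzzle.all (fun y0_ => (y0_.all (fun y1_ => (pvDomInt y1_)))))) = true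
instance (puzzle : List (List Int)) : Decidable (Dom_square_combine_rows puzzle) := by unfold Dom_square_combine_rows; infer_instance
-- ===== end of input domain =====

-- B computes each 3x3 box directly from slice arithmetic instead of A's split→counter-bucket→flatten pipeline (objective: simpler).

-- ===== PORT A =====
-- helper split_rows of A
def pv_split_rows (puzzle : List (List Int)) : List (List Int) :=
  puzzle.foldl (fun splitArr i =>
    splitArr ++ [PySem.List.slice i none (some 3),
                 PySem.List.slice i (some 3) (some 6),
                 PySem.List.slice i (some 6) (some 9)]) []

-- squares[k].append(i)
def pvAppendAt (sq : List (List (List Int))) (k : Nat) (x : List Int) : List (List (List Int)) :=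
  sq.set k (sq.getD k [] ++ [x])

-- one iteration of A's counter-dispatch loop in combine_to_squares
def pvStepA (st : List (List (List Int)) × Int) (i : List Int) : List (List (List Int)) × Int :=
  ((if st.2 = 0 ∨ st.2 = 3 ∨ st.2 = 6 then pvAppendAt st.1 0 i
    else if st.2 = 1 ∨ st.2 = 4 ∨ st.2 = 7 then pvAppendAt st.1 1 i
    else if st.2 = 2 ∨ st.2 = 5 ∨ st.2 = 8 then pvAppendAt st.1 2 i
    else if st.2 = 9 ∨ st.2 = 12 ∨ st.2 = 15 then pvAppendAt st.1 3 i
    else if st.2 = 10 ∨ st.2 = 13 ∨ st.2 = 16 then pvAppendAt st.1 4 i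
    else if st.2 = 11 ∨ st.2 = 14 ∨ st.2 = 17 then pvAppendAt st.1 5 i
    else if st.2 = 18 ∨ st.2 = 21 ∨ st.2 = 24 then pvAppendAt st.1 6 i
    else if st.2 = 19 ∨ st.2 = 22 ∨ st.2 = 25 then pvAppendAt st.1 7 i
    else if st.2 = 20 ∨ st.2 = 23 ∨ st.2 = 26 then pvAppendAt st.1 8 i
    else st.1), st.2 + 1)

def pv_combine_to_squares (puzzle : List (List Int)) : List (List (List Int)) :=
  ((pv_split_rows puzzle).foldl pvStepA ([[],[],[],[],[],[],[],[],[]], 0)).1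

def square_combine_rows (puzzle : List (List Int)) : List (List Int) :=
  (pv_combine_to_squares puzzle).foldl (fun output i =>
    output ++ [i.foldl (fun squareAsRow e =>
      e.foldl (fun squareAsRow n => squareAsRow ++ [n]) squareAsRow) []]) []

-- ===== PORT B =====
def square_combine_rows_alt (puzzle : List (List Int)) : List (List Int) :=
  (PySem.List.pyRange 0 9 1).foldl (fun output b =>
    let br := PySem.Int.floordiv b 3 * 3
    let bc := PySem.Int.mod b 3 * 3
    let row := (PySem.List.pyRange br (br + 3) 1).foldl (fun row r =>
      if r < (puzzle.length : Int) then
        row ++ PySem.List.slice (PySem.List.pyGetD puzzle r []) (some bc) (some (bc + 3))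
      else row) []
    output ++ [row]) []

-- ===== PRECONDITION & SPEC =====
def Spec_square_combine_rows (puzzle : List (List Int)) (out : List (List Int)) : Prop := out = square_combine_rows_alt puzzle
instance (puzzle : List (List Int)) (out : List (List Int)) : Decidable (Spec_square_combine_rows puzzle out) := by unfold Spec_square_combine_rows; infer_instance

-- ===== CLAIM (what is proved, stated in full; the proofs are below) =====
def Claim_equal_square_combine_rows : Prop := ∀ (puzzle : List (List Int)), Dom_square_combine_rows puzzle → Spec_square_combine_rows puzzle (square_combine_rows puzzle)

-- ===== LEMMAS AND PROOFS =====

theorem hr9 : PySem.List.pyRange 0 9 1 = [0,1,2,3,4,5,6,7,8] := by decide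
theorem hr03 : PySem.List.pyRange 0 3 1 = [0,1,2] := by decide
theorem hr36 : PySem.List.pyRange 3 6 1 = [3,4,5] := by decide
theorem hr69 : PySem.List.pyRange 6 9 1 = [6,7,8] := by decide

theorem flat_single (r : List Int) : (List.map (fun x => [x]) r).flatten = r := by
  induction r with | nil => rfl | cons a t ih => simp [ih]

-- A's counter is incremented once per chunk
theorem pvFoldA_snd (l : List (List Int)) (st : List (List (List Int)) × Int) :
    (l.foldl pvStepA st).2 = st.2 + l.length := by
  induction l generalizing st with
  | nil => simp
  | cons x xs ih => simp only [List.foldl_cons, ih, pvStepA, List.length_cons]; push_cast; ring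

-- once the counter has passed 26, A's dispatch loop keeps the squares unchanged
theorem pvFold_past (l : List (List Int)) (st : List (List (List Int)) × Int) (h : 27 ≤ st.2) :
    (l.foldl pvStepA st).1 = st.1 := by
  induction l generalizing st with
  | nil => rfl
  | cons x xs ih =>
    have h1 : (pvStepA st x).1 = st.1 := by
      simp only [pvStepA]; split_ifs <;> first | rfl | omega
    have h2 : (pvStepA st x).2 = st.2 + 1 := rfl
    simp only [List.foldl_cons]
    rw [ih (pvStepA st x) (by omega), h1]

theorem fd0 : PySem.Int.floordiv 0 3 = 0 := by decide
theorem fd1 : PySem.Int.floordiv 1 3 = 0 := by decide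
theorem fd2 : PySem.Int.floordiv 2 3 = 0 := by decide
theorem fd3 : PySem.Int.floordiv 3 3 = 1 := by decide
theorem fd4 : PySem.Int.floordiv 4 3 = 1 := by decide
theorem fd5 : PySem.Int.floordiv 5 3 = 1 := by decide
theorem fd6 : PySem.Int.floordiv 6 3 = 2 := by decide
theorem fd7 : PySem.Int.floordiv 7 3 = 2 := by decide
theorem fd8 : PySem.Int.floordiv 8 3 = 2 := by decide
theorem md0 : PySem.Int.mod 0 3 = 0 := by decide
theorem md1 : PySem.Int.mod 1 3 = 1 := by decide
theorem md2 : PySem.Int.mod 2 3 = 2 := by decide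
theorem md3 : PySem.Int.mod 3 3 = 0 := by decide
theorem md4 : PySem.Int.mod 4 3 = 1 := by decide
theorem md5 : PySem.Int.mod 5 3 = 2 := by decide
theorem md6 : PySem.Int.mod 6 3 = 0 := by decide
theorem md7 : PySem.Int.mod 7 3 = 1 := by decide
theorem md8 : PySem.Int.mod 8 3 = 2 := by decide

-- rows past the ninth never reach an `elif` branch of A
theorem combineA_tail (r0 r1 r2 r3 r4 r5 r6 r7 r8 : List Int) (rest : List (List Int)) :
    pv_combine_to_squares (r0::r1::r2::r3::r4::r5::r6::r7::r8::rest) =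
    pv_combine_to_squares [r0,r1,r2,r3,r4,r5,r6,r7,r8] := by
  unfold pv_combine_to_squares pv_split_rows
  simp only [List.foldl_cons, List.foldl_nil]
  rw [PySem.List.foldl_append_eq_flatMap]
  rw [List.foldl_append]
  apply pvFold_past
  rw [pvFoldA_snd]
  simp

theorem A_tail (r0 r1 r2 r3 r4 r5 r6 r7 r8 : List Int) (rest : List (List Int)) :
    square_combine_rows (r0::r1::r2::r3::r4::r5::r6::r7::r8::rest) =
    square_combine_rows [r0,r1,r2,r3,r4,r5,r6,r7,r8] := by
  unfold square_combine_rows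
  rw [combineA_tail]

-- B only ever reads the first nine rows
set_option maxHeartbeats 8000000 in
theorem altB_tail (r0 r1 r2 r3 r4 r5 r6 r7 r8 : List Int) (rest : List (List Int)) :
    square_combine_rows_alt (r0::r1::r2::r3::r4::r5::r6::r7::r8::rest) =
    square_combine_rows_alt [r0,r1,r2,r3,r4,r5,r6,r7,r8] := by
  have h0 : (0:Int) < ((r0::r1::r2::r3::r4::r5::r6::r7::r8::rest).length : Int) := by simp <;> omega
  have h1 : (1:Int) < ((r0::r1::r2::r3::r4::r5::r6::r7::r8::rest).length : Int) := by simp <;> omega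
  have h2 : (2:Int) < ((r0::r1::r2::r3::r4::r5::r6::r7::r8::rest).length : Int) := by simp <;> omega
  have h3 : (3:Int) < ((r0::r1::r2::r3::r4::r5::r6::r7::r8::rest).length : Int) := by simp <;> omega
  have h4 : (4:Int) < ((r0::r1::r2::r3::r4::r5::r6::r7::r8::rest).length : Int) := by simp <;> omega
  have h5 : (5:Int) < ((r0::r1::r2::r3::r4::r5::r6::r7::r8::rest).length : Int) := by simp <;> omega
  have h6 : (6:Int) < ((r0::r1::r2::r3::r4::r5::r6::r7::r8::rest).length : Int) := by simp <;> omega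
  have h7 : (7:Int) < ((r0::r1::r2::r3::r4::r5::r6::r7::r8::rest).length : Int) := by simp <;> omega
  have h8 : (8:Int) < ((r0::r1::r2::r3::r4::r5::r6::r7::r8::rest).length : Int) := by simp <;> omega
  have g0 : PySem.List.pyGetD (r0::r1::r2::r3::r4::r5::r6::r7::r8::rest) 0 [] = r0 := by simp [pysem]
  have g1 : PySem.List.pyGetD (r0::r1::r2::r3::r4::r5::r6::r7::r8::rest) 1 [] = r1 := by simp [pysem]
  have g2 : PySem.List.pyGetD (r0::r1::r2::r3::r4::r5::r6::r7::r8::rest) 2 [] = r2 := by simp [pysem]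
  have g3 : PySem.List.pyGetD (r0::r1::r2::r3::r4::r5::r6::r7::r8::rest) 3 [] = r3 := by simp [pysem]
  have g4 : PySem.List.pyGetD (r0::r1::r2::r3::r4::r5::r6::r7::r8::rest) 4 [] = r4 := by simp [pysem]
  have g5 : PySem.List.pyGetD (r0::r1::r2::r3::r4::r5::r6::r7::r8::rest) 5 [] = r5 := by simp [pysem]
  have g6 : PySem.List.pyGetD (r0::r1::r2::r3::r4::r5::r6::r7::r8::rest) 6 [] = r6 := by simp [pysem]
  have g7 : PySem.List.pyGetD (r0::r1::r2::r3::r4::r5::r6::r7::r8::rest) 7 [] = r7 := by simp [pysem]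
  have g8 : PySem.List.pyGetD (r0::r1::r2::r3::r4::r5::r6::r7::r8::rest) 8 [] = r8 := by simp [pysem]
  have i0 : (0:Int) < (([r0,r1,r2,r3,r4,r5,r6,r7,r8] : List (List Int)).length : Int) := by simp <;> omega
  have i1 : (1:Int) < (([r0,r1,r2,r3,r4,r5,r6,r7,r8] : List (List Int)).length : Int) := by simp <;> omega
  have i2 : (2:Int) < (([r0,r1,r2,r3,r4,r5,r6,r7,r8] : List (List Int)).length : Int) := by simp <;> omega
  have i3 : (3:Int) < (([r0,r1,r2,r3,r4,r5,r6,r7,r8] : List (List Int)).length : Int) := by simp <;> omega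
  have i4 : (4:Int) < (([r0,r1,r2,r3,r4,r5,r6,r7,r8] : List (List Int)).length : Int) := by simp <;> omega
  have i5 : (5:Int) < (([r0,r1,r2,r3,r4,r5,r6,r7,r8] : List (List Int)).length : Int) := by simp <;> omega
  have i6 : (6:Int) < (([r0,r1,r2,r3,r4,r5,r6,r7,r8] : List (List Int)).length : Int) := by simp <;> omega
  have i7 : (7:Int) < (([r0,r1,r2,r3,r4,r5,r6,r7,r8] : List (List Int)).length : Int) := by simp <;> omega
  have i8 : (8:Int) < (([r0,r1,r2,r3,r4,r5,r6,r7,r8] : List (List Int)).length : Int) := by simp <;> omega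
  have q0 : PySem.List.pyGetD ([r0,r1,r2,r3,r4,r5,r6,r7,r8] : List (List Int)) 0 [] = r0 := by simp [pysem]
  have q1 : PySem.List.pyGetD ([r0,r1,r2,r3,r4,r5,r6,r7,r8] : List (List Int)) 1 [] = r1 := by simp [pysem]
  have q2 : PySem.List.pyGetD ([r0,r1,r2,r3,r4,r5,r6,r7,r8] : List (List Int)) 2 [] = r2 := by simp [pysem]
  have q3 : PySem.List.pyGetD ([r0,r1,r2,r3,r4,r5,r6,r7,r8] : List (List Int)) 3 [] = r3 := by simp [pysem]
  have q4 : PySem.List.pyGetD ([r0,r1,r2,r3,r4,r5,r6,r7,r8] : List (List Int)) 4 [] = r4 := by simp [pysem]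
  have q5 : PySem.List.pyGetD ([r0,r1,r2,r3,r4,r5,r6,r7,r8] : List (List Int)) 5 [] = r5 := by simp [pysem]
  have q6 : PySem.List.pyGetD ([r0,r1,r2,r3,r4,r5,r6,r7,r8] : List (List Int)) 6 [] = r6 := by simp [pysem]
  have q7 : PySem.List.pyGetD ([r0,r1,r2,r3,r4,r5,r6,r7,r8] : List (List Int)) 7 [] = r7 := by simp [pysem]
  have q8 : PySem.List.pyGetD ([r0,r1,r2,r3,r4,r5,r6,r7,r8] : List (List Int)) 8 [] = r8 := by simp [pysem]
  simp only [square_combine_rows_alt, hr9, fd0, fd1, fd2, fd3, fd4, fd5, fd6, fd7, fd8, md0, md1, md2, md3, md4, md5, md6, md7, md8, Int.reduceMul, Int.reduceAdd, hr03, hr36, hr69,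
    List.foldl_cons, List.foldl_nil]
  simp only [h0, h1, h2, h3, h4, h5, h6, h7, h8, g0, g1, g2, g3, g4, g5, g6, g7, g8, if_true]
  simp only [i0, i1, i2, i3, i4, i5, i6, i7, i8, q0, q1, q2, q3, q4, q5, q6, q7, q8, if_true]

set_option maxHeartbeats 8000000 in
theorem main9 (r0 r1 r2 r3 r4 r5 r6 r7 r8 : List Int) :
    square_combine_rows [r0,r1,r2,r3,r4,r5,r6,r7,r8] =
    square_combine_rows_alt [r0,r1,r2,r3,r4,r5,r6,r7,r8] := by
  simp only [square_combine_rows, square_combine_rows_alt, pv_combine_to_squares, pv_split_rows]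
  rw [hr9]
  simp [pvStepA, pvAppendAt, List.getD, fd0, fd1, fd2, fd3, fd4, fd5, fd6, fd7, fd8, md0, md1, md2, md3, md4, md5, md6, md7, md8, hr03, hr36, hr69]
  try simp [pysem, ← List.map_take, ← List.map_drop, flat_single]

-- ===== VERDICT (by name: the statement is the Claim_ definition above) =====
set_option maxHeartbeats 8000000 in
theorem square_combine_rows_spec : Claim_equal_square_combine_rows := by
  intro puzzle _
  unfold Spec_square_combine_rows
  rcases puzzle with _ | ⟨r0, _ | ⟨r1, _ | ⟨r2, _ | ⟨r3, _ | ⟨r4, _ | ⟨r5, _ | ⟨r6, _ | ⟨r7, _ | ⟨r8, rest⟩⟩⟩⟩⟩⟩⟩⟩⟩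
  all_goals (first
    | (rw [A_tail, altB_tail]; exact main9 r0 r1 r2 r3 r4 r5 r6 r7 r8)
    | (
    simp only [square_combine_rows, square_combine_rows_alt, pv_combine_to_squares, pv_split_rows]
    rw [hr9]
    simp [pvStepA, pvAppendAt, List.getD, fd0, fd1, fd2, fd3, fd4, fd5, fd6, fd7, fd8, md0, md1, md2, md3, md4, md5, md6, md7, md8, hr03, hr36, hr69]
    try simp [pysem, ← List.map_take, ← List.map_drop, flat_single]))
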